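-- pv_equiv track=rewrite | github.com/Mang0o/leetcode | 395_longestSubstring.py | process_string
-- ===== SOURCE A (Python) =====
-- def process_string(string, pos):
--     result = []
--     before = 0
--     pos = set(pos)
--     for i in range(len(string) + 1):
--         if (i in pos) or (i == len(string)):
--             current = string[before:i]
--             if current:
--                 result.append(current)
--             before = i + 1
--     return result
-- ===== SOURCE B (Python) =====
-- def process_string(string, pos):
--     n = len(string)
--     bounds = sorted(p for p in set(pos) if 0 <= p < n)
--     result = []
--     before = 0
--     for b in bounds + [n]:
--         seg = string[before:b]
--         if seg:
--             result.append(seg)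
--         before = b + 1
--     return result
-- ===== Notes on version B (the rewrite author's own statement) =====
-- stated objective: alternative
-- what changed: Instead of scanning every index 0..len(string) and testing set membership at each, B sorts the in-range split positions once and iterates only over those boundaries (plus the end), slicing between them.
import Mathlib
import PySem

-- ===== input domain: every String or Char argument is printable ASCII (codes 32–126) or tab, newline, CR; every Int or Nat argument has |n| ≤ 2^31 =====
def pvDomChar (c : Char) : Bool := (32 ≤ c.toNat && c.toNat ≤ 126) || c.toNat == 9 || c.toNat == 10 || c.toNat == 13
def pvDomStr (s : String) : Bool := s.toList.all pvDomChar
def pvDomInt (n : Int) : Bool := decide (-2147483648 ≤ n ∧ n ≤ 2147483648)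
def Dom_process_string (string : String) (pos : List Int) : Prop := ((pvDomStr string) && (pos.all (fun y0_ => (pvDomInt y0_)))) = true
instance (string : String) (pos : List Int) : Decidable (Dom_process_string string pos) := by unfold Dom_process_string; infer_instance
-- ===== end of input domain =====

-- B replaces A's scan over every index 0..len(string) (with a set-membership test at each index)
-- by one pass over the sorted in-range split positions plus the end (alternative decomposition; same result, no per-index membership test).

-- ===== PORT A =====
-- A: result=[]; before=0; pos=set(pos); for i in range(len(string)+1): if (i in pos) or (i==len): slice, append if nonempty, before=i+1
def process_string (string : String) (pos : List Int) : List String :=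
  let cs := string.toList
  let pset : PySem.Set Int := PySem.Set.ofList pos
  let st := (PySem.List.pyRange 0 ((cs.length : Int) + 1) 1).foldl
    (fun (st : List String × Int) i =>
      if PySem.Set.contains pset i || i == (cs.length : Int) then
        let current := PySem.List.slice cs (some st.2) (some i)
        (if current ≠ [] then st.1 ++ [String.ofList current] else st.1, i + 1)
      else st) ([], 0)
  st.1

-- ===== PORT B =====
-- B: bounds = sorted(p for p in set(pos) if 0 <= p < n); loop over bounds + [n], slice between, append if nonempty
def process_string_alt (string : String) (pos : List Int) : List String :=
  let cs := string.toList
  let n : Int := cs.length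
  let bounds := PySem.List.sorted
    ((PySem.Set.ofList pos).filter (fun p => decide (0 ≤ p) && decide (p < n))) (fun x => x) false
  let st := (bounds ++ [n]).foldl
    (fun (st : List String × Int) b =>
      let seg := PySem.List.slice cs (some st.2) (some b)
      (if seg ≠ [] then st.1 ++ [String.ofList seg] else st.1, b + 1)) ([], 0)
  st.1

-- ===== PRECONDITION & SPEC =====
def Spec_process_string (string : String) (pos : List Int) (out : List String) : Prop := out = process_string_alt string pos
instance (string : String) (pos : List Int) (out : List String) : Decidable (Spec_process_string string pos out) := by unfold Spec_process_string; infer_instance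

-- ===== CLAIM (what is proved, stated in full; the proofs are below) =====
def Claim_equal_process_string : Prop := ∀ (string : String) (pos : List Int), Dom_process_string string pos → Spec_process_string string pos (process_string string pos)

-- ===== LEMMAS AND PROOFS =====

-- The indices A's loop fires on are exactly B's boundary list: bounds ++ [n].
theorem pv_trigger_list (pos : List Int) (n : Int) (hn : 0 ≤ n) :
    (PySem.List.pyRange 0 (n + 1) 1).filter
      (fun i => PySem.Set.contains (PySem.Set.ofList pos) i || i == n)
    = PySem.List.sorted
        ((PySem.Set.ofList pos).filter (fun p => decide (0 ≤ p) && decide (p < n))) (fun x => x) false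
      ++ [n] := by
  rw [PySem.List.pyRange_one_succ_right hn, List.filter_append]
  have htail : List.filter
      (fun i => PySem.Set.contains (PySem.Set.ofList pos) i || i == n) [n]
      = [n] := by simp
  rw [htail]
  congr 1
  have hcongr : List.filter
      (fun i => PySem.Set.contains (PySem.Set.ofList pos) i || i == n)
      (PySem.List.pyRange 0 n 1)
      = List.filter (fun i => PySem.Set.contains (PySem.Set.ofList pos) i)
          (PySem.List.pyRange 0 n 1) := by
    apply List.filter_congr
    intro x hx
    have hlt : x < n := (PySem.List.mem_pyRange_one.mp hx).2
    simp [show x ≠ n by omega]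
  rw [hcongr]
  symm
  apply PySem.List.sorted_eq_of_perm_of_pairwise_lt
  · rw [List.perm_ext_iff_of_nodup
      ((PySem.List.nodup_pyRange_one 0 n).filter _)
      ((PySem.Set.nodup_ofList (xs := pos)).filter _)]
    intro a
    simp [PySem.List.mem_pyRange_one, PySem.Set.mem_ofList, and_comm]
  · exact (PySem.List.pairwise_lt_pyRange_one 0 n).filter _

theorem process_string_eq (string : String) (pos : List Int) :
    process_string string pos = process_string_alt string pos := by
  unfold process_string process_string_alt
  simp only [PySem.List.foldl_if_eq_foldl_filter]
  rw [pv_trigger_list pos ((string.toList.length : Int)) (by positivity)]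

-- ===== VERDICT (by name: the statement is the Claim_ definition above) =====
theorem process_string_spec : Claim_equal_process_string := by
  intro s pos _
  exact process_string_eq s pos
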